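-- pv_equiv track=rewrite | github.com/major-lab/RNA2D | python/rna_2d/src/RNA_2D.py | isValidDotBracket
-- ===== SOURCE A (Python) =====
-- def isValidDotBracket(dotBracket):
--     """tests Vienna dot-bracket for illegal structure (or symbol)"""
--     counter = 0
--     for i in dotBracket:
--         if i=='(':
--             counter+=1
--         elif i==')':
--             counter-=1
--         elif i!='.': #illegal symbol
--             return False
--         if counter < 0: #unbalanced structure
--             return False
--     if counter!= 0:
--         return False #unbalanced structure
--     return True
-- ===== SOURCE B (Python) =====
-- def isValidDotBracket(dotBracket):
--     """Two-pass check: one set-difference symbol validation, then a right-to-left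
--     scan matching each '(' against the ')' count to its right."""
--     if set(dotBracket) - {'(', ')', '.'}:
--         return False
--     unmatched = 0
--     for c in reversed(dotBracket):
--         if c == ')':
--             unmatched += 1
--         elif c == '(':
--             if unmatched == 0:
--                 return False
--             unmatched -= 1
--     return unmatched == 0
-- ===== Notes on version B (the rewrite author's own statement) =====
-- stated objective: alternative
-- what changed: B replaces A's single fused left-to-right counter loop by a set-difference symbol-validation pass followed by a right-to-left scan matching each opening bracket against the count of closing brackets to its right.
import Mathlib
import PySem

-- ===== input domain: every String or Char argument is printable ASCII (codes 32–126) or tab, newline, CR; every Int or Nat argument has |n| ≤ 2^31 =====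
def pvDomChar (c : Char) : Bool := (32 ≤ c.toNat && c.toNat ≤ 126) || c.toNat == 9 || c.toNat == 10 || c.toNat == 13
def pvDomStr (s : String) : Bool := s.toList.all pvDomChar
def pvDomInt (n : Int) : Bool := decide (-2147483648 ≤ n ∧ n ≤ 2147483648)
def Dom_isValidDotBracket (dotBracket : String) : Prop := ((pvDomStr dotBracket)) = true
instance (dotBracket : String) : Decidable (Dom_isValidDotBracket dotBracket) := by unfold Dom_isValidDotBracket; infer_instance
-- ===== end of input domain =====

-- B validates the symbol set with one set difference and then matches brackets right-to-left;
-- an alternative decomposition of the same O(n) task (return value proved equal on all inputs).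

-- ===== PORT A =====
-- the fused loop of A: counter updated per character, early False on illegal symbol / negative counter
def pvGoA (l : List Char) (counter : Int) : Bool :=
  match l with
  | [] => if counter ≠ 0 then false else true
  | i :: rest =>
    if i = '(' then
      if counter + 1 < 0 then false else pvGoA rest (counter + 1)
    else if i = ')' then
      if counter - 1 < 0 then false else pvGoA rest (counter - 1)
    else if i ≠ '.' then false
    else if counter < 0 then false else pvGoA rest counter

def isValidDotBracket (dotBracket : String) : Bool :=
  pvGoA dotBracket.toList 0

-- ===== PORT B =====
-- B's right-to-left scan: 'unmatched' counts closing brackets not yet matched to their left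
def pvGoB (l : List Char) (unmatched : Int) : Bool :=
  match l with
  | [] => unmatched == 0
  | c :: rest =>
    if c = ')' then pvGoB rest (unmatched + 1)
    else if c = '(' then
      if unmatched = 0 then false else pvGoB rest (unmatched - 1)
    else pvGoB rest unmatched

def isValidDotBracket_alt (dotBracket : String) : Bool :=
  if PySem.Set.diff (PySem.Set.ofList dotBracket.toList) ['(', ')', '.'] ≠ [] then false
  else pvGoB dotBracket.toList.reverse 0

-- ===== PRECONDITION & SPEC =====
def Spec_isValidDotBracket (dotBracket : String) (out : Bool) : Prop := out = isValidDotBracket_alt dotBracket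
instance (dotBracket : String) (out : Bool) : Decidable (Spec_isValidDotBracket dotBracket out) := by unfold Spec_isValidDotBracket; infer_instance

-- ===== CLAIM (what is proved, stated in full; the proofs are below) =====
def Claim_equal_isValidDotBracket : Prop := ∀ (dotBracket : String), Dom_isValidDotBracket dotBracket → Spec_isValidDotBracket dotBracket (isValidDotBracket dotBracket)

-- ===== LEMMAS AND PROOFS =====

/-- Net bracket balance of a character list. -/
def pvBal (l : List Char) : Int :=
  (l.countP (· = '(') : Int) - (l.countP (· = ')') : Int)

lemma pvBal_nil : pvBal [] = 0 := rfl

lemma pvBal_cons (c : Char) (t : List Char) :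
    pvBal (c :: t) = (if c = '(' then 1 else 0) - (if c = ')' then 1 else 0) + pvBal t := by
  simp [pvBal, List.countP_cons]
  split_ifs <;> omega

lemma pvBal_append (p q : List Char) : pvBal (p ++ q) = pvBal p + pvBal q := by
  simp [pvBal, List.countP_append]; omega

lemma pvBal_reverse (l : List Char) : pvBal l.reverse = pvBal l := by
  simp [pvBal]

/-- Characterisation of A's loop. -/
lemma pvGoA_char (l : List Char) : ∀ c : Int, 0 ≤ c →
    (pvGoA l c = true ↔
      ((∀ x ∈ l, x = '(' ∨ x = ')' ∨ x = '.') ∧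
       (∀ n : Nat, 0 ≤ c + pvBal (l.take n)) ∧ c + pvBal l = 0)) := by
  induction l with
  | nil =>
    intro c hc
    simp [pvGoA, pvBal]
    omega
  | cons i t ih =>
    intro c hc
    have hsplit : (∀ n : Nat, 0 ≤ c + pvBal ((i :: t).take n)) ↔
        (0 ≤ c ∧ ∀ n : Nat, 0 ≤ c + pvBal (i :: t.take n)) := by
      constructor
      · intro h
        refine ⟨by simpa [pvBal_nil] using h 0, fun n => by simpa using h (n + 1)⟩
      · rintro ⟨h0, h⟩ n
        cases n with
        | zero => simpa [pvBal_nil] using h0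
        | succ m => simpa using h m
    by_cases hi : i = '('
    · subst hi
      have h1 : ¬ (c + 1 < 0) := by omega
      rw [show pvGoA ('(' :: t) c = pvGoA t (c + 1) by simp [pvGoA, h1]]
      rw [ih (c + 1) (by omega), hsplit]
      constructor
      · rintro ⟨hl, hpre, htot⟩
        refine ⟨fun x hx => by rcases List.mem_cons.mp hx with rfl | h; exacts [Or.inl rfl, hl x h],
                ⟨hc, fun n => by rw [pvBal_cons]; simp; have := hpre n; omega⟩,
                by rw [pvBal_cons]; simp; omega⟩
      · rintro ⟨hl, ⟨h0, hpre⟩, htot⟩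
        refine ⟨fun x hx => hl x (by simp [hx]),
                fun n => by have := hpre n; rw [pvBal_cons] at this; simp at this; omega,
                by rw [pvBal_cons] at htot; simp at htot; omega⟩
    · by_cases hi2 : i = ')'
      · subst hi2
        rw [show pvGoA (')' :: t) c = if c - 1 < 0 then false else pvGoA t (c - 1) by
          simp [pvGoA]]
        by_cases hneg : c - 1 < 0
        · simp [hneg]
          intro hl hpre
          have := hpre 1
          rw [show (')' :: t).take 1 = [')'] by rfl] at this
          have hb : pvBal [')'] = -1 := rfl
          omega
        · rw [if_neg hneg, ih (c - 1) (by omega), hsplit]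
          constructor
          · rintro ⟨hl, hpre, htot⟩
            refine ⟨fun x hx => by rcases List.mem_cons.mp hx with rfl | h; exacts [Or.inr (Or.inl rfl), hl x h],
                    ⟨hc, fun n => by rw [pvBal_cons]; simp [hi]; have := hpre n; omega⟩,
                    by rw [pvBal_cons]; simp [hi]; omega⟩
          · rintro ⟨hl, ⟨h0, hpre⟩, htot⟩
            refine ⟨fun x hx => hl x (by simp [hx]),
                    fun n => by have := hpre n; rw [pvBal_cons] at this; simp [hi] at this; omega,
                    by rw [pvBal_cons] at htot; simp [hi] at htot; omega⟩
      · by_cases hi3 : i = '.'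
        · subst hi3
          have hneg : ¬ (c < 0) := by omega
          rw [show pvGoA ('.' :: t) c = pvGoA t c by simp [pvGoA, hneg]]
          rw [ih c hc, hsplit]
          constructor
          · rintro ⟨hl, hpre, htot⟩
            refine ⟨fun x hx => by rcases List.mem_cons.mp hx with rfl | h; exacts [Or.inr (Or.inr rfl), hl x h],
                    ⟨hc, fun n => by rw [pvBal_cons]; simp; have := hpre n; omega⟩,
                    by rw [pvBal_cons]; simp; omega⟩
          · rintro ⟨hl, ⟨h0, hpre⟩, htot⟩
            refine ⟨fun x hx => hl x (by simp [hx]),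
                    fun n => by have := hpre n; rw [pvBal_cons] at this; simp at this; omega,
                    by rw [pvBal_cons] at htot; simp at htot; omega⟩
        · rw [show pvGoA (i :: t) c = false by simp [pvGoA, hi, hi2, hi3]]
          simp
          intro h
          rcases h with rfl | rfl | rfl <;> simp_all

/-- Characterisation of B's loop (no legality needed: other symbols are skipped). -/
lemma pvGoB_char (l : List Char) : ∀ u : Int, 0 ≤ u →
    (pvGoB l u = true ↔
      ((∀ n : Nat, 0 ≤ u - pvBal (l.take n)) ∧ u - pvBal l = 0)) := by
  induction l with
  | nil =>
    intro u hu
    simp [pvGoB, pvBal]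
    omega
  | cons c t ih =>
    intro u hu
    have hsplit : (∀ n : Nat, 0 ≤ u - pvBal ((c :: t).take n)) ↔
        (0 ≤ u ∧ ∀ n : Nat, 0 ≤ u - pvBal (c :: t.take n)) := by
      constructor
      · intro h
        refine ⟨by simpa [pvBal_nil] using h 0, fun n => by simpa using h (n + 1)⟩
      · rintro ⟨h0, h⟩ n
        cases n with
        | zero => simpa [pvBal_nil] using h0
        | succ m => simpa using h m
    by_cases hc : c = ')'
    · subst hc
      rw [show pvGoB (')' :: t) u = pvGoB t (u + 1) by simp [pvGoB]]
      rw [ih (u + 1) (by omega), hsplit]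
      constructor
      · rintro ⟨hpre, htot⟩
        refine ⟨⟨hu, fun n => by rw [pvBal_cons]; simp; have := hpre n; omega⟩,
                by rw [pvBal_cons]; simp; omega⟩
      · rintro ⟨⟨h0, hpre⟩, htot⟩
        refine ⟨fun n => by have := hpre n; rw [pvBal_cons] at this; simp at this; omega,
                by rw [pvBal_cons] at htot; simp at htot; omega⟩
    · by_cases hc2 : c = '('
      · subst hc2
        rw [show pvGoB ('(' :: t) u = if u = 0 then false else pvGoB t (u - 1) by
          simp [pvGoB, hc]]
        by_cases hz : u = 0
        · simp [hz]
          intro hpre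
          have := hpre 1
          rw [show ('(' :: t).take 1 = ['('] by rfl] at this
          have hb : pvBal ['('] = 1 := rfl
          omega
        · rw [if_neg hz, ih (u - 1) (by omega), hsplit]
          constructor
          · rintro ⟨hpre, htot⟩
            refine ⟨⟨hu, fun n => by rw [pvBal_cons]; simp [hc]; have := hpre n; omega⟩,
                    by rw [pvBal_cons]; simp [hc]; omega⟩
          · rintro ⟨⟨h0, hpre⟩, htot⟩
            refine ⟨fun n => by have := hpre n; rw [pvBal_cons] at this; simp [hc] at this; omega,
                    by rw [pvBal_cons] at htot; simp [hc] at htot; omega⟩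
      · rw [show pvGoB (c :: t) u = pvGoB t u by simp [pvGoB, hc, hc2]]
        rw [ih u hu, hsplit]
        constructor
        · rintro ⟨hpre, htot⟩
          refine ⟨⟨hu, fun n => by rw [pvBal_cons]; simp [hc, hc2]; have := hpre n; omega⟩,
                  by rw [pvBal_cons]; simp [hc, hc2]; omega⟩
        · rintro ⟨⟨h0, hpre⟩, htot⟩
          refine ⟨fun n => by have := hpre n; rw [pvBal_cons] at this; simp [hc, hc2] at this; omega,
                  by rw [pvBal_cons] at htot; simp [hc, hc2] at htot; omega⟩

/-- take-form of the prefix condition ↔ decomposition form. -/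
lemma pv_take_iff_decomp (l : List Char) (f : Int → Prop) :
    (∀ n : Nat, f (pvBal (l.take n))) ↔ (∀ p q : List Char, l = p ++ q → f (pvBal p)) := by
  constructor
  · rintro h p q rfl
    have := h p.length
    simpa [List.take_left] using this
  · intro h n
    exact h (l.take n) (l.drop n) (l.take_append_drop n).symm

lemma pv_set_diff_iff (l : List Char) :
    (PySem.Set.diff (PySem.Set.ofList l) ['(', ')', '.'] = []) ↔
      (∀ x ∈ l, x = '(' ∨ x = ')' ∨ x = '.') := by
  rw [List.eq_nil_iff_forall_not_mem]
  constructor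
  · intro h x hx
    have := h x
    rw [PySem.Set.mem_diff] at this
    simp [PySem.Set.mem_ofList, hx] at this
    tauto
  · intro h x hx
    rw [PySem.Set.mem_diff, PySem.Set.mem_ofList] at hx
    rcases hx with ⟨hmem, hnot⟩
    rcases h x hmem with h' | h' | h' <;> simp [h'] at hnot

-- ===== VERDICT (by name: the statement is the Claim_ definition above) =====
theorem isValidDotBracket_spec : Claim_equal_isValidDotBracket := by
  intro s _
  unfold Spec_isValidDotBracket isValidDotBracket isValidDotBracket_alt
  set l := s.toList with hl
  by_cases hleg : PySem.Set.diff (PySem.Set.ofList l) ['(', ')', '.'] = []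
  · rw [if_neg (by simpa using hleg)]
    have hlegal := (pv_set_diff_iff l).mp hleg
    have hA := pvGoA_char l 0 le_rfl
    have hB := pvGoB_char l.reverse 0 le_rfl
    simp only [zero_add, zero_sub] at hA hB
    cases hgoal : pvGoA l 0 with
    | true =>
      rcases hA.mp hgoal with ⟨_, hpre, htot⟩
      symm
      rw [hB]
      rw [pv_take_iff_decomp l.reverse (fun b => 0 ≤ -b)] at *
      refine ⟨?_, by rw [pvBal_reverse]; omega⟩
      rintro p q hpq
      have : l = q.reverse ++ p.reverse := by
        have := congrArg List.reverse hpq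
        simpa using this
      rw [pv_take_iff_decomp l (fun b => 0 ≤ b)] at hpre
      have h1 := hpre q.reverse p.reverse this
      have h2 : pvBal (q.reverse ++ p.reverse) = pvBal l := by rw [← this]
      rw [pvBal_append, pvBal_reverse, pvBal_reverse] at h2
      rw [pvBal_reverse] at *
      omega
    | false =>
      symm
      rw [Bool.eq_false_iff]
      intro hBtrue
      rcases hB.mp hBtrue with ⟨hpre, htot⟩
      rw [pvBal_reverse] at htot
      apply absurd hgoal
      rw [Bool.not_eq_false, hA]
      refine ⟨hlegal, ?_, by omega⟩
      rw [pv_take_iff_decomp l (fun b => 0 ≤ b)]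
      intro p q hpq
      rw [pv_take_iff_decomp l.reverse (fun b => 0 ≤ -b)] at hpre
      have h1 := hpre q.reverse p.reverse (by rw [hpq]; simp)
      rw [pvBal_reverse] at h1
      have h2 : pvBal l = pvBal p + pvBal q := by rw [hpq, pvBal_append]
      omega
  · rw [if_pos (by simpa using hleg)]
    rw [Bool.eq_false_iff]
    intro hAtrue
    rcases (pvGoA_char l 0 le_rfl).mp hAtrue with ⟨hlegal, _, _⟩
    exact hleg ((pv_set_diff_iff l).mpr hlegal)
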